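-- pv_equiv track=rewrite | github.com/ZijieJin/SimulationscFusion | BuildTechnicalArtiLibM2.py | poswisedist
-- ===== SOURCE A (Python) =====
-- def poswisedist(str1, str2):
--     maxsamecount = 0
--     current = 0
--     for i in range(len(str1)):
--         if str1.upper()[i] == str2.upper()[i]:
--             current += 1
--             maxsamecount = max(maxsamecount, current)
--         else:
--             current = 0
--     return len(str1) - maxsamecount
-- ===== SOURCE B (Python) =====
-- def poswisedist(str1, str2):
--     u1 = str1.upper()
--     u2 = str2.upper()
--     n = len(str1)
--     bounds = [-1] + [i for i in range(n) if u1[i] != u2[i]] + [n]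
--     best = max(b - a - 1 for a, b in zip(bounds, bounds[1:]))
--     return n - best
-- ===== Notes on version B (the rewrite author's own statement) =====
-- stated objective: faster
-- what changed: B replaces A's fused running-counter/running-maximum scan (which re-uppercases both whole strings on every iteration) by a mismatch-gap analysis: uppercase once, collect the list of mismatch positions with sentinels -1 and n, and return n minus the largest gap between consecutive boundaries.
import Mathlib
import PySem

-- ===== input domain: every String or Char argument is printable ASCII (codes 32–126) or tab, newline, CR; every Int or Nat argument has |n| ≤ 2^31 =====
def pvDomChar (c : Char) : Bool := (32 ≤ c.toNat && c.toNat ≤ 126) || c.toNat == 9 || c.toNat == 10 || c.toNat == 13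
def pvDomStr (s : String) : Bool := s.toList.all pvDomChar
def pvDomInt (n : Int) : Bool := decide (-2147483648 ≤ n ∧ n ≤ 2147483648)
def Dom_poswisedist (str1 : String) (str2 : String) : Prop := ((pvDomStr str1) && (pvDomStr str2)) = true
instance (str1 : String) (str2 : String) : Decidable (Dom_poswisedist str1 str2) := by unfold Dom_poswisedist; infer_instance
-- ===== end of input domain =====

-- B replaces A's fused counter scan (which re-uppercases both strings every iteration) by a
-- mismatch-gap analysis: uppercase once, list mismatch positions with sentinels, subtract the
-- largest boundary gap (measured faster on large inputs).


-- ===== PORT A =====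
-- state = (maxsamecount, current); A re-uppercases both strings on every iteration, as the Python does
def poswisedist (str1 : String) (str2 : String) : Int :=
  let st := (PySem.List.pyRange 0 (PySem.Str.len str1) 1).foldl
    (fun (s : Int × Int) i =>
      if PySem.Str.pyGet? (PySem.Str.upper str1) i == PySem.Str.pyGet? (PySem.Str.upper str2) i then
        (max s.1 (s.2 + 1), s.2 + 1)
      else
        (s.1, 0))
    (0, 0)
  PySem.Str.len str1 - st.1

-- ===== PORT B =====
def poswisedist_alt (str1 : String) (str2 : String) : Int :=
  let u1 := PySem.Str.upper str1
  let u2 := PySem.Str.upper str2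
  let n := PySem.Str.len str1
  -- bounds = [-1] + [i for i in range(n) if u1[i] != u2[i]] + [n]
  let bounds := -1 :: ((PySem.List.pyRange 0 n 1).filter
      (fun i => !(PySem.Str.pyGet? u1 i == PySem.Str.pyGet? u2 i))) ++ [n]
  -- best = max(b - a - 1 for a, b in zip(bounds, bounds[1:])); bounds has ≥ 2 elements, so the
  -- generator is nonempty and Python's max returns; .getD 0 is unreachable
  let gaps := (bounds.zip (PySem.List.slice bounds (some 1) none)).map (fun p => p.2 - p.1 - 1)
  n - (PySem.List.max? gaps id).getD 0

-- ===== PRECONDITION & SPEC =====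
-- Pre_ excludes exactly the inputs where Python A raises IndexError: len(str1) > len(str2)
def Pre_poswisedist (str1 : String) (str2 : String) : Prop :=
  PySem.Str.len str1 ≤ PySem.Str.len str2
instance (str1 : String) (str2 : String) : Decidable (Pre_poswisedist str1 str2) := by
  unfold Pre_poswisedist; infer_instance
def pvWitness_poswisedist : String × String := ("aBc", "Abd")

def Spec_poswisedist (str1 : String) (str2 : String) (out : Int) : Prop := out = poswisedist_alt str1 str2
instance (str1 : String) (str2 : String) (out : Int) : Decidable (Spec_poswisedist str1 str2 out) := by unfold Spec_poswisedist; infer_instance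

-- ===== CLAIM (what is proved, stated in full; the proofs are below) =====
def Claim_equal_poswisedist : Prop := ∀ (str1 : String) (str2 : String), Dom_poswisedist str1 str2 → Pre_poswisedist str1 str2 → Spec_poswisedist str1 str2 (poswisedist str1 str2)

-- ===== LEMMAS AND PROOFS =====

-- proof-side: the gap list of a boundary list
def pvGaps (l : List Int) : List Int := (l.zip l.tail).map (fun p => p.2 - p.1 - 1)

-- proof-side: increment the last element of a nonempty list
def pvBump : List Int → List Int
  | [] => []
  | [x] => [x + 1]
  | x :: y :: xs => x :: pvBump (y :: xs)

theorem pvGaps_cons (x y : Int) (l : List Int) :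
    pvGaps (x :: y :: l) = (y - x - 1) :: pvGaps (y :: l) := by
  simp [pvGaps]

theorem pvGaps_bump (l : List Int) (a : Int) (h : l ≠ []) :
    pvGaps (l ++ [a + 1]) = pvBump (pvGaps (l ++ [a])) := by
  induction l with
  | nil => simp at h
  | cons x xs ih =>
    cases xs with
    | nil => simp [pvGaps, pvBump]; ring
    | cons y ys =>
      have ih' : pvGaps (y :: (ys ++ [a + 1])) = pvBump (pvGaps (y :: (ys ++ [a]))) := by
        simpa using ih (by simp)
      have hne : pvGaps (y :: (ys ++ [a])) ≠ [] := by cases ys <;> simp [pvGaps]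
      simp only [List.cons_append, pvGaps_cons, ih']
      rcases hg : pvGaps (y :: (ys ++ [a])) with _ | ⟨g, gs⟩
      · exact absurd hg hne
      · simp [pvBump]

theorem pvGaps_append_two (l : List Int) (a b : Int) :
    pvGaps (l ++ [a, b]) = pvGaps (l ++ [a]) ++ [b - a - 1] := by
  induction l with
  | nil => simp [pvGaps]
  | cons x xs ih =>
    cases xs with
    | nil => simp [pvGaps]
    | cons y ys => simp only [List.cons_append, pvGaps_cons] at *; rw [ih]

-- B's boundary-gap list evolves by bump-last / append-0 along the index scan
theorem pvGaps_foldl (cond : Int → Bool) : ∀ (k : Nat),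
    pvGaps (-1 :: (PySem.List.pyRange 0 k 1).filter (fun i => !(cond i)) ++ [(k : Int)]) =
      (PySem.List.pyRange 0 k 1).foldl
        (fun rs i => if cond i then pvBump rs else rs ++ [0]) [0] := by
  intro k
  induction k with
  | zero => simp [pvGaps]
  | succ k ih =>
    have hr : PySem.List.pyRange 0 ((k : Int) + 1) 1 = PySem.List.pyRange 0 k 1 ++ [(k : Int)] :=
      PySem.List.pyRange_one_succ_right (by positivity)
    push_cast
    rw [hr, List.filter_append, List.foldl_append]
    by_cases hc : cond k
    · have hq : List.filter (fun i => !cond i) [(k : Int)] = [] := by simp [hc]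
      rw [hq, List.append_nil]
      have hb := pvGaps_bump (-1 :: (PySem.List.pyRange 0 (k : Int) 1).filter (fun i => !cond i))
        (k : Int) (by simp)
      rw [hb, ih]
      simp [hc]
    · have hq : List.filter (fun i => !cond i) [(k : Int)] = [(k : Int)] := by simp [hc]
      rw [hq]
      rw [show (-1 : Int) :: ((PySem.List.pyRange 0 (k : Int) 1).filter (fun i => !cond i) ++ [(k : Int)]) ++ [(k : Int) + 1]
            = ((-1 : Int) :: (PySem.List.pyRange 0 (k : Int) 1).filter (fun i => !cond i)) ++ [(k : Int), (k : Int) + 1] from by simp,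
        pvGaps_append_two]
      rw [ih]
      simp [hc]

-- the loop invariant: A's (maxsamecount, current) vs the bump/append run-length list
theorem pvInvariant (L : List Int) (cond : Int → Bool) :
    ∀ (m c : Int) (rs : List Int),
      rs.getLast? = some c → (∀ x ∈ rs, x ≤ m) → m ∈ rs → 0 ≤ m →
      let sA := L.foldl (fun (s : Int × Int) i =>
        if cond i then (max s.1 (s.2 + 1), s.2 + 1) else (s.1, 0)) (m, c)
      let rs' := L.foldl (fun rs i => if cond i then pvBump rs else rs ++ [0]) rs
      rs'.getLast? = some sA.2 ∧ (∀ x ∈ rs', x ≤ sA.1) ∧ sA.1 ∈ rs' ∧ 0 ≤ sA.1 := by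
  induction L with
  | nil => intro m c rs h1 h2 h3 h4; exact ⟨h1, h2, h3, h4⟩
  | cons i L ih =>
    intro m c rs h1 h2 h3 h4
    simp only [List.foldl_cons]
    by_cases hc : cond i
    · simp only [hc, if_true]
      have hne : rs ≠ [] := by intro h; simp [h] at h1
      have hbl : pvBump rs = rs.dropLast ++ [c + 1] := by
        clear h2 h3 ih
        induction rs with
        | nil => simp at h1
        | cons x xs ih2 =>
          cases xs with
          | nil => simp_all [pvBump]
          | cons y ys =>
            simp only [List.getLast?_cons_cons] at h1
            simp [pvBump, ih2 h1 (by simp)]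
      have hclast : c ∈ rs := List.mem_of_getLast? h1
      have hcle : c ≤ m := h2 c hclast
      refine ih (max m (c + 1)) (c + 1) (pvBump rs) ?_ ?_ ?_ (by omega)
      · rw [hbl]; simp
      · intro x hx
        rw [hbl] at hx
        rcases List.mem_append.mp hx with hx | hx
        · have := h2 x (List.dropLast_subset rs hx); omega
        · simp at hx; omega
      · rw [hbl]
        by_cases hle : m ≤ c + 1
        · have : max m (c + 1) = c + 1 := by omega
          rw [this]; simp
        · have hmax : max m (c + 1) = m := by omega
          rw [hmax]
          have hlastc : rs.getLast hne = c := by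
            have hg := List.getLast?_eq_some_getLast hne
            rw [hg] at h1; exact Option.some_inj.mp h1
          have hrs : rs = rs.dropLast ++ [c] := by
            conv_lhs => rw [← List.dropLast_concat_getLast hne]
            rw [hlastc]
          rcases List.mem_append.mp (hrs ▸ h3) with hin | hin
          · exact List.mem_append.mpr (Or.inl hin)
          · simp at hin; omega
    · simp only [hc, if_false, Bool.false_eq_true]
      refine ih m 0 (rs ++ [0]) (by simp) ?_ (List.mem_append.mpr (Or.inl h3)) h4
      intro x hx
      rcases List.mem_append.mp hx with hx | hx
      · exact h2 x hx
      · simp at hx; omega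

theorem max?_of_bounds (rs : List Int) (m : Int) (hm : m ∈ rs) (hb : ∀ x ∈ rs, x ≤ m) :
    (PySem.List.max? rs id).getD 0 = m := by
  have hne : rs ≠ [] := List.ne_nil_of_mem hm
  rcases hv : PySem.List.max? rs id with _ | v
  · exact absurd ((PySem.List.max?_eq_none_iff rs id).mp hv) hne
  · have h1 : v ∈ rs := PySem.List.max?_mem hv
    have h2 : ∀ y ∈ rs, id y ≤ id v := PySem.List.max?_isMax hv
    have := h2 m hm
    have := hb v h1
    simp only [Option.getD_some]
    simp only [id] at *
    omega

-- ===== VERDICT (by name: the statement is the Claim_ definition above) =====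
theorem poswisedist_spec : Claim_equal_poswisedist := by
  intro str1 str2 _ _
  unfold Spec_poswisedist poswisedist poswisedist_alt
  simp only [PySem.List.slice_from_one]
  have hlen : PySem.Str.len str1 = ((str1.toList.length : Nat) : Int) := by
    simp [PySem.Str.len_eq]
  rw [hlen]
  set k := str1.toList.length with hk
  set cond := fun i => PySem.Str.pyGet? (PySem.Str.upper str1) i == PySem.Str.pyGet? (PySem.Str.upper str2) i with hcond
  have hgaps : ((-1 :: (PySem.List.pyRange 0 (k : Int) 1).filter (fun i => !(cond i)) ++ [(k : Int)]).zip
        ((-1 :: (PySem.List.pyRange 0 (k : Int) 1).filter (fun i => !(cond i)) ++ [(k : Int)]).tail)).map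
        (fun p => p.2 - p.1 - 1)
      = pvGaps (-1 :: (PySem.List.pyRange 0 (k : Int) 1).filter (fun i => !(cond i)) ++ [(k : Int)]) := rfl
  rw [hgaps, pvGaps_foldl cond k]
  have h := pvInvariant (PySem.List.pyRange 0 (k : Int) 1) cond 0 0 [0]
    (by simp) (by simp) (by simp) (by simp)
  obtain ⟨-, h2, h3, -⟩ := h
  rw [max?_of_bounds _ _ h3 h2]
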